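-- pv_equiv track=rewrite | github.com/ptrebert/sciddo | src/scidlib/auxiliary.py | sort_columns_bed_order
-- ===== SOURCE A (Python) =====
-- def sort_columns_bed_order(column_names):
--     """
--     :param column_names:
--     :return:
--     """
--     lexorder = [(idx, name) for idx, name in enumerate(sorted(column_names), start=100)]
--     reorder = []
--     for pos, name in lexorder:
--         if name in ['chrom', 'chromosome', '#chrom']:
--             reorder.append((0, name))
--         elif name in ['start', 'start_bp', 'chromStart']:
--             reorder.append((1, name))
--         elif name in ['end', 'end_bp', 'chromEnd']:
--             reorder.append((2, name))
--         elif name in ['name', 'ID']: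
--             reorder.append((3, name))
--         elif name in ['score', 'nat_score']:
--             reorder.append((4, name))
--         elif name in ['strand']:
--             reorder.append((5, name))
--         elif name in ['nat_score_std']:
--             reorder.append((6, name))
--         elif name in ['pValue', 'segment_pv']:
--             reorder.append((7, name))
--         elif name in ['Evalue', 'segment_expect']:
--             reorder.append((8, name))
--         elif name in ['start_bin']:
--             reorder.append((10, name))
--         elif name in ['end_bin']:
--             reorder.append((11, name))
--         else:
--             reorder.append((pos, name))
--     reorder = sorted(reorder)
--     return [t[1] for t in reorder]
-- ===== SOURCE B (Python) =====
-- _BED_PRIO = {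
--     'chrom': 0, 'chromosome': 0, '#chrom': 0,
--     'start': 1, 'start_bp': 1, 'chromStart': 1,
--     'end': 2, 'end_bp': 2, 'chromEnd': 2,
--     'name': 3, 'ID': 3,
--     'score': 4, 'nat_score': 4,
--     'strand': 5,
--     'nat_score_std': 6,
--     'pValue': 7, 'segment_pv': 7,
--     'Evalue': 8, 'segment_expect': 8,
--     'start_bin': 10,
--     'end_bin': 11,
-- }
--
--
-- def sort_columns_bed_order(column_names):
--     # Bucket distribution: one alphabetical sort, then distribute each name
--     # into its priority bucket (unknown names into a trailing bucket) and
--     # concatenate the buckets in priority order.  No second sort is needed: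
--     # each bucket inherits the alphabetical order of the distribution pass.
--     buckets = [[] for _ in range(12)]
--     unknown = []
--     for name in sorted(column_names):
--         prio = _BED_PRIO.get(name)
--         if prio is None:
--             unknown.append(name)
--         else:
--             buckets[prio].append(name)
--     result = []
--     for bucket in buckets:
--         result.extend(bucket)
--     result.extend(unknown)
--     return result
-- ===== Notes on version B (the rewrite author's own statement) =====
-- stated objective: faster
-- what changed: A enumerates the sorted names from 100, classifies each through an 11-branch if/elif chain into (priority, name) pairs and runs a second comparison sort on the pairs; B sorts once alphabetically and then distributes the names into 12 priority buckets (plus a trailing unknown bucket) and concatenates the buckets, so the second sort and the tuple comparisons disappear.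
import Mathlib
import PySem

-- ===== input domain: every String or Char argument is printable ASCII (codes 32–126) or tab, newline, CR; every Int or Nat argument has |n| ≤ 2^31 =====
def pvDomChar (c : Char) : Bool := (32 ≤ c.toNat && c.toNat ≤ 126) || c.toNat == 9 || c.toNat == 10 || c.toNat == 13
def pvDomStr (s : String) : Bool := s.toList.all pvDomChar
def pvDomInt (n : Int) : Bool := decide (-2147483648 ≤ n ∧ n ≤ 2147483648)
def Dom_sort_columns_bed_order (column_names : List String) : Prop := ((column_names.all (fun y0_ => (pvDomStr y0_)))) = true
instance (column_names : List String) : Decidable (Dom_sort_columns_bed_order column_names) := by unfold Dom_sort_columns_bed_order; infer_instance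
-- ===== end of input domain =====

-- B replaces A's enumerate / if-elif classification / second keyed sort with a bucket
-- distribution: one alphabetical sort, then each name is appended to its priority bucket
-- (unknowns to a trailing bucket) and the buckets are concatenated (objective: alternative).

-- ===== PORT A =====
def sort_columns_bed_order (column_names : List String) : List String :=
  let lexorder := PySem.List.enumerate (PySem.List.sorted column_names (fun n => n) false) 100
  let reorder := lexorder.foldl (fun reorder pn =>
    let pos := pn.1
    let name := pn.2
    if name ∈ ["chrom", "chromosome", "#chrom"] then reorder ++ [((0 : Int), name)]
    else if name ∈ ["start", "start_bp", "chromStart"] then reorder ++ [((1 : Int), name)]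
    else if name ∈ ["end", "end_bp", "chromEnd"] then reorder ++ [((2 : Int), name)]
    else if name ∈ ["name", "ID"] then reorder ++ [((3 : Int), name)]
    else if name ∈ ["score", "nat_score"] then reorder ++ [((4 : Int), name)]
    else if name ∈ ["strand"] then reorder ++ [((5 : Int), name)]
    else if name ∈ ["nat_score_std"] then reorder ++ [((6 : Int), name)]
    else if name ∈ ["pValue", "segment_pv"] then reorder ++ [((7 : Int), name)]
    else if name ∈ ["Evalue", "segment_expect"] then reorder ++ [((8 : Int), name)]
    else if name ∈ ["start_bin"] then reorder ++ [((10 : Int), name)]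
    else if name ∈ ["end_bin"] then reorder ++ [((11 : Int), name)]
    else reorder ++ [(pos, name)]) []
  let reorder2 := PySem.List.sorted2 reorder (fun t => t.1) (fun t => t.2) false
  reorder2.map (fun t => t.2)

-- ===== PORT B =====
def bedPrio : PySem.Dict String Int :=
  ⟨[("chrom", 0), ("chromosome", 0), ("#chrom", 0),
    ("start", 1), ("start_bp", 1), ("chromStart", 1),
    ("end", 2), ("end_bp", 2), ("chromEnd", 2),
    ("name", 3), ("ID", 3),
    ("score", 4), ("nat_score", 4),
    ("strand", 5),
    ("nat_score_std", 6),
    ("pValue", 7), ("segment_pv", 7),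
    ("Evalue", 8), ("segment_expect", 8),
    ("start_bin", 10),
    ("end_bin", 11)]⟩

-- buckets[prio].append(name): prio is a value of _BED_PRIO, hence 0 ≤ prio < 12, so the
-- Nat-indexed List.set / List.getD is exact for Python's list indexing here.
def sort_columns_bed_order_alt (column_names : List String) : List String :=
  let st := (PySem.List.sorted column_names (fun n => n) false).foldl
    (fun st name =>
      match PySem.Dict.get? bedPrio name with
      | none => (st.1, st.2 ++ [name])
      | some prio => (st.1.set prio.toNat ((st.1.getD prio.toNat []) ++ [name]), st.2))
    (List.replicate 12 [], [])
  (st.1.foldl (fun result bucket => result ++ bucket) []) ++ st.2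

-- ===== PRECONDITION & SPEC =====
def Spec_sort_columns_bed_order (column_names : List String) (out : List String) : Prop := out = sort_columns_bed_order_alt column_names
instance (column_names : List String) (out : List String) : Decidable (Spec_sort_columns_bed_order column_names out) := by unfold Spec_sort_columns_bed_order; infer_instance

-- ===== CLAIM (what is proved, stated in full; the proofs are below) =====
def Claim_equal_sort_columns_bed_order : Prop := ∀ (column_names : List String), Dom_sort_columns_bed_order column_names → Spec_sort_columns_bed_order column_names (sort_columns_bed_order column_names)

-- ===== LEMMAS AND PROOFS =====

-- the 21 recognized column names
def pvKnown : List String :=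
  ["chrom", "chromosome", "#chrom", "start", "start_bp", "chromStart",
   "end", "end_bp", "chromEnd", "name", "ID", "score", "nat_score",
   "strand", "nat_score_std", "pValue", "segment_pv", "Evalue", "segment_expect",
   "start_bin", "end_bin"]

-- priority of a name, 100 for unknown (the common sort key of the proof)
def pvG (n : String) : Int := PySem.Dict.getD bedPrio n 100

lemma pvG_lt_of_mem {n : String} (h : n ∈ pvKnown) : pvG n < 100 := by
  fin_cases h <;> decide

set_option maxRecDepth 4096 in
lemma get?_of_not_mem {n : String} (h : n ∉ pvKnown) : PySem.Dict.get? bedPrio n = none := by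
  simp only [pvKnown, List.mem_cons, List.not_mem_nil, or_false, not_or] at h
  have hf : List.find? (fun p => p.1 == n) bedPrio.items = none := by
    rw [List.find?_eq_none]
    intro p hp
    fin_cases hp <;> (simp only [beq_iff_eq]; intro e; subst e; simp at h)
  unfold PySem.Dict.get?
  rw [hf]
  rfl

lemma pvG_of_not_mem {n : String} (h : n ∉ pvKnown) : pvG n = 100 := by
  unfold pvG PySem.Dict.getD
  rw [get?_of_not_mem h]
  rfl

lemma pvG_eq_of_get? {n : String} {q : Int} (h : PySem.Dict.get? bedPrio n = some q) :
    pvG n = q := by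
  unfold pvG PySem.Dict.getD
  rw [h]
  rfl

lemma bedPrio_val {n : String} {q : Int} (h : PySem.Dict.get? bedPrio n = some q) :
    0 ≤ q ∧ q < 12 := by
  unfold PySem.Dict.get? at h
  rcases hf : List.find? (fun p => p.1 == n) bedPrio.items with _ | p
  · rw [hf] at h; exact absurd h (by simp)
  · rw [hf] at h
    have hm := List.mem_of_find?_eq_some hf
    have hq : p.2 = q := by simpa using h
    subst hq
    fin_cases hm <;> decide

-- A's classification loop is a map with this entry function
def pvF (p : Int × String) : Int × String :=
  (if p.2 ∈ pvKnown then pvG p.2 else p.1, p.2)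

lemma reorder_eq_map (E : List (Int × String)) :
    E.foldl (fun reorder pn =>
      let pos := pn.1
      let name := pn.2
      if name ∈ ["chrom", "chromosome", "#chrom"] then reorder ++ [((0 : Int), name)]
      else if name ∈ ["start", "start_bp", "chromStart"] then reorder ++ [((1 : Int), name)]
      else if name ∈ ["end", "end_bp", "chromEnd"] then reorder ++ [((2 : Int), name)]
      else if name ∈ ["name", "ID"] then reorder ++ [((3 : Int), name)]
      else if name ∈ ["score", "nat_score"] then reorder ++ [((4 : Int), name)]
      else if name ∈ ["strand"] then reorder ++ [((5 : Int), name)]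
      else if name ∈ ["nat_score_std"] then reorder ++ [((6 : Int), name)]
      else if name ∈ ["pValue", "segment_pv"] then reorder ++ [((7 : Int), name)]
      else if name ∈ ["Evalue", "segment_expect"] then reorder ++ [((8 : Int), name)]
      else if name ∈ ["start_bin"] then reorder ++ [((10 : Int), name)]
      else if name ∈ ["end_bin"] then reorder ++ [((11 : Int), name)]
      else reorder ++ [(pos, name)]) [] = E.map pvF := by
  have hbody : (fun (reorder : List (Int × String)) (pn : Int × String) =>
      let pos := pn.1
      let name := pn.2
      if name ∈ ["chrom", "chromosome", "#chrom"] then reorder ++ [((0 : Int), name)]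
      else if name ∈ ["start", "start_bp", "chromStart"] then reorder ++ [((1 : Int), name)]
      else if name ∈ ["end", "end_bp", "chromEnd"] then reorder ++ [((2 : Int), name)]
      else if name ∈ ["name", "ID"] then reorder ++ [((3 : Int), name)]
      else if name ∈ ["score", "nat_score"] then reorder ++ [((4 : Int), name)]
      else if name ∈ ["strand"] then reorder ++ [((5 : Int), name)]
      else if name ∈ ["nat_score_std"] then reorder ++ [((6 : Int), name)]
      else if name ∈ ["pValue", "segment_pv"] then reorder ++ [((7 : Int), name)]
      else if name ∈ ["Evalue", "segment_expect"] then reorder ++ [((8 : Int), name)]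
      else if name ∈ ["start_bin"] then reorder ++ [((10 : Int), name)]
      else if name ∈ ["end_bin"] then reorder ++ [((11 : Int), name)]
      else reorder ++ [(pos, name)]) = (fun acc pn => acc ++ [pvF pn]) := by
    funext acc pn
    obtain ⟨pos, name⟩ := pn
    by_cases hn : name ∈ pvKnown
    · fin_cases hn <;> rfl
    · simp only []
      have h12 : ∀ (l : List String), l.Sublist pvKnown → name ∉ l := fun l hs hm => hn (hs.mem hm)
      rw [if_neg (h12 _ (by decide)), if_neg (h12 _ (by decide)), if_neg (h12 _ (by decide)),
          if_neg (h12 _ (by decide)), if_neg (h12 _ (by decide)), if_neg (h12 _ (by decide)),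
          if_neg (h12 _ (by decide)), if_neg (h12 _ (by decide)), if_neg (h12 _ (by decide)),
          if_neg (h12 _ (by decide)), if_neg (h12 _ (by decide))]
      simp [pvF, if_neg hn]
  rw [hbody, PySem.List.foldl_append_singleton_eq_map, List.nil_append]

-- insertion-sort pairwise invariant
lemma pairwise_insertBy {α : Type} (before : α → α → Bool)
    (hasym : ∀ a b, before a b = true → before b a = false)
    (htrans : ∀ a b c, before b a = false → before c b = false → before c a = false)
    (x : α) (acc : List α) (h : acc.Pairwise (fun a b => before b a = false)) :
    (PySem.List.insertBy before x acc).Pairwise (fun a b => before b a = false) := by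
  induction acc with
  | nil => simp [PySem.List.insertBy]
  | cons y ys ih =>
    rw [PySem.List.insertBy]
    rcases List.pairwise_cons.mp h with ⟨hy, hys⟩
    by_cases hxy : before x y = true
    · rw [if_pos hxy]
      refine List.pairwise_cons.mpr ⟨?_, h⟩
      intro z hz
      rcases List.mem_cons.mp hz with rfl | hz'
      · exact hasym x z hxy
      · exact htrans x y z (hasym x y hxy) (hy z hz')
    · rw [if_neg hxy]
      refine List.pairwise_cons.mpr ⟨?_, ih hys⟩
      intro z hz
      rcases (PySem.List.mem_insertBy before x z ys).mp hz with rfl | hz'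
      · exact Bool.not_eq_true _ ▸ (Bool.eq_false_iff.mpr hxy)
      · exact hy z hz'

lemma pairwise_foldl_insertBy {α : Type} (before : α → α → Bool)
    (hasym : ∀ a b, before a b = true → before b a = false)
    (htrans : ∀ a b c, before b a = false → before c b = false → before c a = false)
    (xs : List α) (acc : List α) (h : acc.Pairwise (fun a b => before b a = false)) :
    (xs.foldl (fun acc x => PySem.List.insertBy before x acc) acc).Pairwise
      (fun a b => before b a = false) := by
  induction xs generalizing acc with
  | nil => exact h
  | cons x xs ih => exact ih _ (pairwise_insertBy before hasym htrans x acc h)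

-- sorted2 with an Int first key and a String second key is pairwise lexicographically ordered
lemma sorted2_pairwise_IS {α : Type} (xs : List α) (k1 : α → Int) (k2 : α → String) :
    (PySem.List.sorted2 xs k1 k2 false).Pairwise
      (fun a b => k1 a < k1 b ∨ (k1 a = k1 b ∧ k2 a ≤ k2 b)) := by
  have key : ∀ a b : α,
      ((fun a b => decide (k1 a < k1 b) || (!decide (k1 b < k1 a) && decide (k2 a < k2 b))) b a = false)
        ↔ (k1 a < k1 b ∨ (k1 a = k1 b ∧ k2 a ≤ k2 b)) := by
    intro a b
    simp only [Bool.or_eq_false_iff, Bool.and_eq_false_iff, Bool.not_eq_false',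
      decide_eq_false_iff_not, decide_eq_true_eq]
    constructor
    · rintro ⟨h1, h2 | h2⟩
      · exact Or.inl h2
      · rcases lt_or_ge (k1 a) (k1 b) with h | h
        · exact Or.inl h
        · exact Or.inr ⟨le_antisymm (not_lt.mp h1) h, not_lt.mp h2⟩
    · rintro (h | ⟨h1, h2⟩)
      · exact ⟨lt_asymm h, Or.inl h⟩
      · exact ⟨h1 ▸ lt_irrefl _, Or.inr (not_lt.mpr h2)⟩
  have hasym : ∀ a b : α,
      (fun a b => decide (k1 a < k1 b) || (!decide (k1 b < k1 a) && decide (k2 a < k2 b))) a b = true →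
      (fun a b => decide (k1 a < k1 b) || (!decide (k1 b < k1 a) && decide (k2 a < k2 b))) b a = false := by
    intro a b h
    simp only [Bool.or_eq_true, Bool.and_eq_true, Bool.not_eq_true', decide_eq_true_eq,
      decide_eq_false_iff_not] at h
    rcases h with h | ⟨h1, h2⟩
    · simp [lt_asymm h, h]
    · by_cases hq : k1 a < k1 b <;> simp [h1, hq, lt_asymm h2]
  have htrans : ∀ a b c : α,
      (fun a b => decide (k1 a < k1 b) || (!decide (k1 b < k1 a) && decide (k2 a < k2 b))) b a = false →
      (fun a b => decide (k1 a < k1 b) || (!decide (k1 b < k1 a) && decide (k2 a < k2 b))) c b = false →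
      (fun a b => decide (k1 a < k1 b) || (!decide (k1 b < k1 a) && decide (k2 a < k2 b))) c a = false := by
    intro a b c hab hbc
    rw [key] at hab hbc ⊢
    rcases hab with h | ⟨h1, h2⟩ <;> rcases hbc with h' | ⟨h1', h2'⟩
    · exact Or.inl (lt_trans h h')
    · exact Or.inl (h1' ▸ h)
    · exact Or.inl (h1 ▸ h')
    · exact Or.inr ⟨h1.trans h1', le_trans h2 h2'⟩
  have hpf := pairwise_foldl_insertBy
    (fun a b => decide (k1 a < k1 b) || (!decide (k1 b < k1 a) && decide (k2 a < k2 b)))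
    hasym htrans xs [] List.Pairwise.nil
  exact List.Pairwise.imp (fun {a b} h => (key a b).mp h) hpf

-- A's classification of a classified pair: known entries carry their priority (< 100),
-- unknown entries carry their enumeration position 100 + k
lemma mem_mapF_char (ys : List String) (p : Int × String)
    (hp : p ∈ (PySem.List.enumerate ys 100).map pvF) :
    (p.1 = pvG p.2 ∧ pvG p.2 < 100) ∨
      (pvG p.2 = 100 ∧ ∃ k, ∃ (hk : k < ys.length), p = (100 + (k : Int), ys[k])) := by
  rcases List.mem_map.mp hp with ⟨x, hx, hfx⟩
  rcases (PySem.List.mem_enumerate_iff ys 100 x).mp hx with ⟨k, hk, rfl⟩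
  subst hfx
  by_cases hn : ys[k] ∈ pvKnown
  · exact Or.inl ⟨by simp [pvF, if_pos hn], pvG_lt_of_mem hn⟩
  · exact Or.inr ⟨pvG_of_not_mem hn, k, hk, by simp [pvF, if_neg hn]⟩

-- ---------- B side: bucket distribution = per-priority filters ----------

-- does name n land in bucket p?
def predB (p : Nat) (n : String) : Bool := PySem.Dict.get? bedPrio n == some (p : Int)

-- is name n unknown?
def unkB (n : String) : Bool := (PySem.Dict.get? bedPrio n).isNone

-- closed form of B's bucket contents
def pvCF (ys : List String) : List String :=
  ((List.range 12).map (fun p => ys.filter (predB p))).flatten ++ ys.filter unkB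

lemma foldl_append_flatten {α : Type} (L : List (List α)) (acc : List α) :
    L.foldl (fun a b => a ++ b) acc = acc ++ L.flatten := by
  induction L generalizing acc with
  | nil => simp
  | cons b L ih => simp [List.foldl_cons, ih, List.append_assoc]

lemma fold_buckets (ys : List String) (bs : List (List String)) (r : List String)
    (hbs : bs.length = 12) :
    ys.foldl (fun st name =>
      match PySem.Dict.get? bedPrio name with
      | none => (st.1, st.2 ++ [name])
      | some prio => (st.1.set prio.toNat ((st.1.getD prio.toNat []) ++ [name]), st.2)) (bs, r)
    = ((List.range 12).map (fun p => bs.getD p [] ++ ys.filter (predB p)),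
        r ++ ys.filter unkB) := by
  induction ys generalizing bs r with
  | nil =>
    simp only [List.foldl_nil, List.filter_nil, List.append_nil]
    refine Prod.ext ?_ rfl
    apply List.ext_getElem
    · simp [hbs]
    · intro i h1 h2
      simp only [List.getElem_map, List.getElem_range]
      rw [List.getD_eq_getElem _ _ (by rw [hbs]; simpa using h2)]
  | cons name ys ih =>
    rw [List.foldl_cons]
    rcases hg : PySem.Dict.get? bedPrio name with _ | q
    · simp only [hg]
      rw [ih bs (r ++ [name]) hbs]
      have hu : unkB name = true := by simp [unkB, hg]
      have hp : ∀ p, predB p name = false := by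
        intro p; simp [predB, hg]
      simp [hu, hp, List.append_assoc]
    · simp only [hg]
      have hq := bedPrio_val hg
      have hqn : q.toNat < 12 := by omega
      have hlen : (bs.set q.toNat (bs.getD q.toNat [] ++ [name])).length = 12 := by
        simp [hbs]
      rw [ih _ r hlen]
      have hu : unkB name = false := by simp [unkB, hg]
      refine Prod.ext ?_ (by simp [hu])
      simp only []
      apply List.map_congr_left
      intro p hpmem
      have hplt : p < 12 := List.mem_range.mp hpmem
      by_cases hpq : p = q.toNat
      · have hpred : predB p name = true := by
          simp only [predB, hg, Option.some.injEq, beq_iff_eq]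
          omega
        rw [List.filter_cons_of_pos hpred, hpq]
        have e1 : (bs.set q.toNat (bs.getD q.toNat [] ++ [name])).getD q.toNat []
            = bs.getD q.toNat [] ++ [name] := by
          simp [List.getD_eq_getElem?_getD, hbs, hqn]
        rw [e1, List.append_assoc]
        rfl
      · have hpred : predB p name = false := by
          simp only [predB, hg, Option.some.injEq, beq_eq_false_iff_ne, ne_eq]
          omega
        rw [List.filter_cons_of_neg (by simp [hpred])]
        have e1 : (bs.set q.toNat (bs.getD q.toNat [] ++ [name])).getD p [] = bs.getD p [] := by
          simp [List.getD_eq_getElem?_getD, List.getElem?_set_ne (fun h => hpq h.symm)]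
        rw [e1]

-- B's port computes the closed form on the alphabetically sorted input
lemma alt_eq_CF (xs : List String) :
    sort_columns_bed_order_alt xs = pvCF (PySem.List.sorted xs (fun n => n) false) := by
  unfold sort_columns_bed_order_alt pvCF
  rw [fold_buckets _ _ _ (by simp)]
  simp only []
  rw [foldl_append_flatten, List.nil_append]
  have hmap : (List.range 12).map (fun p =>
        (List.replicate 12 ([] : List String)).getD p []
          ++ (PySem.List.sorted xs (fun n => n) false).filter (predB p))
      = (List.range 12).map (fun p => (PySem.List.sorted xs (fun n => n) false).filter (predB p)) := by
    apply List.map_congr_left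
    intro p hp
    rw [List.getD_eq_getElem _ _ (by simpa using List.mem_range.mp hp),
        List.getElem_replicate, List.nil_append]
  rw [hmap, List.nil_append]

-- consing one element onto exactly one mapped block permutes to consing onto the flatten
lemma flatten_map_cons_at {α : Type} (ps : List Nat) (hnd : ps.Nodup) (i : Nat)
    (hi : i ∈ ps) (f : Nat → List α) (n : α) :
    ((ps.map (fun p => if p = i then n :: f p else f p)).flatten).Perm
      (n :: (ps.map f).flatten) := by
  induction ps with
  | nil => cases hi
  | cons p ps ih =>
    rcases List.nodup_cons.mp hnd with ⟨hpn, hnd'⟩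
    by_cases hpi : p = i
    · subst hpi
      have htail : ps.map (fun q => if q = p then n :: f q else f q) = ps.map f := by
        apply List.map_congr_left
        intro q hq
        rw [if_neg (by rintro rfl; exact hpn hq)]
      simp only [List.map_cons, List.flatten_cons, htail]
      exact List.Perm.refl _
    · have hi' : i ∈ ps := by rcases List.mem_cons.mp hi with rfl | h; exact absurd rfl hpi; exact h
      simp only [List.map_cons, List.flatten_cons, if_neg hpi]
      exact ((ih hnd' hi').append_left (f p)).trans List.perm_middle

lemma CF_perm (ys : List String) : (pvCF ys).Perm ys := by
  induction ys with
  | nil => simp [pvCF]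
  | cons n ys ih =>
    unfold pvCF
    rcases hg : PySem.Dict.get? bedPrio n with _ | q
    · have hu : unkB n = true := by simp [unkB, hg]
      have hp : ∀ p, predB p n = false := by intro p; simp [predB, hg]
      have hmap : (List.range 12).map (fun p => (n :: ys).filter (predB p))
          = (List.range 12).map (fun p => ys.filter (predB p)) := by
        apply List.map_congr_left
        intro p _
        rw [List.filter_cons_of_neg (by simp [hp p])]
      rw [hmap, List.filter_cons_of_pos hu]
      exact List.perm_middle.trans (ih.cons n)
    · have hq := bedPrio_val hg
      have hqn : q.toNat ∈ List.range 12 := List.mem_range.mpr (by omega)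
      have hu : unkB n = false := by simp [unkB, hg]
      have hmap : (List.range 12).map (fun p => (n :: ys).filter (predB p))
          = (List.range 12).map (fun p => if p = q.toNat then n :: ys.filter (predB p)
              else ys.filter (predB p)) := by
        apply List.map_congr_left
        intro p _
        by_cases hpq : p = q.toNat
        · subst hpq
          rw [if_pos rfl, List.filter_cons_of_pos (by simp only [predB, hg, Option.some.injEq, beq_iff_eq]; omega)]
        · rw [if_neg hpq, List.filter_cons_of_neg (by
            simp only [predB, hg, Option.some.injEq, beq_iff_eq]
            intro e
            exact hpq (by omega))]
      rw [hmap, List.filter_cons_of_neg (by simp [hu])]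
      exact ((flatten_map_cons_at (List.range 12) (List.nodup_range) q.toNat hqn
        (fun p => ys.filter (predB p)) n).append_right (ys.filter unkB)).trans (ih.cons n)

lemma pvG_of_filter_predB {p : Nat} {n : String} (h : predB p n = true) : pvG n = (p : Int) := by
  simp only [predB, beq_iff_eq] at h
  exact pvG_eq_of_get? h

lemma pvG_of_filter_unkB {n : String} (h : unkB n = true) : pvG n = 100 := by
  simp only [unkB, Option.isNone_iff_eq_none] at h
  unfold pvG PySem.Dict.getD
  rw [h]
  rfl

-- the bucket concatenation is pairwise ordered by (pvG, name)
lemma pw_aux (ys : List String) (hys : ys.Pairwise (fun a b : String => a ≤ b))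
    (ps : List Nat) (hlt : ps.Pairwise (· < ·)) (hub : ∀ p ∈ ps, p < 12) :
    ((ps.map (fun p => ys.filter (predB p))).flatten ++ ys.filter unkB).Pairwise
      (fun a b => pvG a < pvG b ∨ (pvG a = pvG b ∧ a ≤ b)) := by
  induction ps with
  | nil =>
    simp only [List.map_nil, List.flatten_nil, List.nil_append]
    refine (List.Pairwise.filter _ hys).imp_of_mem ?_
    intro a b ha hb hab
    exact Or.inr ⟨by rw [pvG_of_filter_unkB (List.of_mem_filter ha),
      pvG_of_filter_unkB (List.of_mem_filter hb)], hab⟩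
  | cons p ps ih =>
    rcases List.pairwise_cons.mp hlt with ⟨hp, hlt'⟩
    simp only [List.map_cons, List.flatten_cons, List.append_assoc]
    rw [List.pairwise_append]
    refine ⟨?_, ih hlt' (fun q hq => hub q (List.mem_cons_of_mem _ hq)), ?_⟩
    · refine (List.Pairwise.filter _ hys).imp_of_mem ?_
      intro a b ha hb hab
      exact Or.inr ⟨by rw [pvG_of_filter_predB (List.of_mem_filter ha),
        pvG_of_filter_predB (List.of_mem_filter hb)], hab⟩
    · intro a ha b hb
      have hga : pvG a = (p : Int) := pvG_of_filter_predB (List.of_mem_filter ha)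
      have hpa : p < 12 := hub p List.mem_cons_self
      left
      rw [hga]
      rcases List.mem_append.mp hb with hb' | hb'
      · rcases List.mem_flatten.mp hb' with ⟨l, hl, hbl⟩
        rcases List.mem_map.mp hl with ⟨q, hq, rfl⟩
        have := pvG_of_filter_predB (List.of_mem_filter hbl)
        rw [this]
        exact_mod_cast hp q hq
      · rw [pvG_of_filter_unkB (List.of_mem_filter hb')]
        omega

-- ===== VERDICT (by name: the statement is the Claim_ definition above) =====
theorem sort_columns_bed_order_spec : Claim_equal_sort_columns_bed_order := by
  intro xs _dom
  unfold Spec_sort_columns_bed_order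
  rw [alt_eq_CF]
  set ys := PySem.List.sorted xs (fun n => n) false with hys
  have hApairs : (sort_columns_bed_order xs).Pairwise
      (fun a b => pvG a < pvG b ∨ (pvG a = pvG b ∧ a ≤ b)) := by
    unfold sort_columns_bed_order
    simp only [← hys, reorder_eq_map (PySem.List.enumerate ys 100)]
    set E := PySem.List.enumerate ys 100 with hE
    set L := PySem.List.sorted2 (E.map pvF) (fun t => t.1) (fun t => t.2) false with hL
    rw [List.pairwise_map]
    have hA := sorted2_pairwise_IS (E.map pvF) (fun t => t.1) (fun t => t.2)
    rw [← hL] at hA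
    refine hA.imp_of_mem ?_
    intro p q hpL hqL hpq
    have hp := mem_mapF_char ys p (((PySem.List.sorted2_perm (E.map pvF) _ _ false).mem_iff).mp (hL ▸ hpL))
    have hq := mem_mapF_char ys q (((PySem.List.sorted2_perm (E.map pvF) _ _ false).mem_iff).mp (hL ▸ hqL))
    rcases hp with ⟨hp1, hp2⟩ | ⟨hp1, k, hk, rfl⟩ <;>
      rcases hq with ⟨hq1, hq2⟩ | ⟨hq1, l, hl, rfl⟩
    · rcases hpq with h | ⟨e, le⟩
      · exact Or.inl (by rw [← hp1, ← hq1]; exact h)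
      · exact Or.inr ⟨by rw [← hp1, ← hq1]; exact e, le⟩
    · exact Or.inl (by rw [hq1]; exact hp2)
    · exfalso
      rcases hpq with h | ⟨e, _⟩
      · simp only at h; omega
      · simp only at e; omega
    · refine Or.inr ⟨by rw [hp1, hq1], ?_⟩
      rcases hpq with h | ⟨e, le⟩
      · simp only at h
        have hkl : k ≤ l := by omega
        simpa using PySem.List.sorted_id_getElem_mono xs hkl (hys ▸ hl)
      · exact le
  have hAperm : (sort_columns_bed_order xs).Perm ys := by
    unfold sort_columns_bed_order
    simp only [← hys, reorder_eq_map (PySem.List.enumerate ys 100)]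
    set E := PySem.List.enumerate ys 100 with hE
    have h1 := (PySem.List.sorted2_perm (E.map pvF) (fun t => t.1) (fun t => t.2) false).map
      (fun t : Int × String => t.2)
    have h2 : (E.map pvF).map (fun t : Int × String => t.2) = ys := by
      rw [List.map_map]
      have : ((fun t : Int × String => t.2) ∘ pvF) = (fun x : Int × String => x.2) := rfl
      rw [this, hE, PySem.List.map_snd_enumerate]
    rw [h2] at h1
    exact h1
  have hBpairs : (pvCF ys).Pairwise (fun a b => pvG a < pvG b ∨ (pvG a = pvG b ∧ a ≤ b)) := by
    unfold pvCF
    exact pw_aux ys (hys ▸ PySem.List.sorted_pairwise xs (fun n => n))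
      (List.range 12) (List.pairwise_lt_range) (fun p hp => List.mem_range.mp hp)
  refine List.Perm.eq_of_pairwise ?_ hApairs hBpairs (hAperm.trans (CF_perm ys).symm)
  intro a b _ _ h h'
  rcases h with h | ⟨e, le1⟩ <;> rcases h' with h' | ⟨e', le2⟩
  · exact absurd h' (lt_asymm h)
  · rw [e'] at h; exact absurd h (lt_irrefl _)
  · rw [e] at h'; exact absurd h' (lt_irrefl _)
  · exact le_antisymm le1 le2
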